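-- pv_equiv track=rewrite | github.com/BounouKha/CareLink | CareLink/account/views/admin_logging.py | get_summary_statistics
-- ===== SOURCE A (Python) =====
-- def get_summary_statistics(logs):
--     """Generate summary statistics from logs"""
--     summary = {
--         'total_logs': len(logs),
--         'error_count': 0,
--         'warning_count': 0,
--         'info_count': 0,
--         'login_count': 0,
--         'logout_count': 0,
--         'ticket_count': 0,
--         'comment_count': 0,
--         'security_count': 0,
--     }
--
--     for log in logs:
--         message = log.get('message', '').upper()
--         level = log.get('level', 'INFO')
--
--         # Count by level
--         if level == 'ERROR':
--             summary['error_count'] += 1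
--         elif level == 'WARNING':
--             summary['warning_count'] += 1
--         else:
--             summary['info_count'] += 1
--
--         # Count by category
--         if 'LOGIN' in message:
--             summary['login_count'] += 1
--         if 'LOGOUT' in message:
--             summary['logout_count'] += 1
--         if 'TICKET' in message:
--             summary['ticket_count'] += 1
--         if 'COMMENT' in message:
--             summary['comment_count'] += 1
--         if 'SECURITY' in message or 'UNAUTHORIZED' in message:
--             summary['security_count'] += 1
--
--     return summary
-- ===== SOURCE B (Python) =====
-- def get_summary_statistics(logs):
--     """Generate summary statistics from logs"""
--     def message(log):
--         return log.get('message', '').upper()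
--
--     def level(log):
--         return log.get('level', 'INFO')
--
--     return {
--         'total_logs': len(logs),
--         'error_count': sum(1 for log in logs if level(log) == 'ERROR'),
--         'warning_count': sum(1 for log in logs if level(log) == 'WARNING'),
--         'info_count': sum(1 for log in logs if level(log) not in ('ERROR', 'WARNING')),
--         'login_count': sum(1 for log in logs if 'LOGIN' in message(log)),
--         'logout_count': sum(1 for log in logs if 'LOGOUT' in message(log)),
--         'ticket_count': sum(1 for log in logs if 'TICKET' in message(log)),
--         'comment_count': sum(1 for log in logs if 'COMMENT' in message(log)),
--         'security_count': sum(1 for log in logs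
--                               if 'SECURITY' in message(log) or 'UNAUTHORIZED' in message(log)),
--     }
-- ===== Notes on version B (the rewrite author's own statement) =====
-- stated objective: idiomatic
-- what changed: Replaces the single loop that mutates nine counters in a dict with independent declarative computations: len(logs) plus one generator-sum per statistic, assembled into the dict literal in one expression.
import Mathlib
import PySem

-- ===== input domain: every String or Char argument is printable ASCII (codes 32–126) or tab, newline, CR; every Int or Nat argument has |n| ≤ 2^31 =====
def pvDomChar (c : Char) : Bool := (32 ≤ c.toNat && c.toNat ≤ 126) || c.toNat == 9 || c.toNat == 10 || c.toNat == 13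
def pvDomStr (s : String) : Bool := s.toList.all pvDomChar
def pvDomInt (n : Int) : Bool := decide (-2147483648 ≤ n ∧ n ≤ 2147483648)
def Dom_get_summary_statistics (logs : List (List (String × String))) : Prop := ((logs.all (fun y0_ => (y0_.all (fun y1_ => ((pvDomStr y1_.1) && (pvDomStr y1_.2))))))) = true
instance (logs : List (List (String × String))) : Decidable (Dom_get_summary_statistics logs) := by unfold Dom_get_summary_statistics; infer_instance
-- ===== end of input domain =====

-- B replaces A's single counter-mutating loop with one independent count per statistic (idiomatic decomposition; same cost).

-- log.get(k, dflt): first-match lookup in the association list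
def pyLogGet (log : List (String × String)) (k dflt : String) : String :=
  match log.find? (fun p => p.1 == k) with
  | some p => p.2
  | none => dflt

-- ===== PORT A =====
-- body of A's for-loop: conditional 'summary[key] += 1' updates on the dict
def gssStep (summary : PySem.Dict String Int) (log : List (String × String)) : PySem.Dict String Int :=
  let message := PySem.Str.upper (pyLogGet log "message" "")
  let level := pyLogGet log "level" "INFO"
  let summary :=
    if level == "ERROR" then summary.modify "error_count" 0 (· + 1)
    else if level == "WARNING" then summary.modify "warning_count" 0 (· + 1)
    else summary.modify "info_count" 0 (· + 1)
  let summary := if PySem.Str.isIn "LOGIN" message then summary.modify "login_count" 0 (· + 1) else summary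
  let summary := if PySem.Str.isIn "LOGOUT" message then summary.modify "logout_count" 0 (· + 1) else summary
  let summary := if PySem.Str.isIn "TICKET" message then summary.modify "ticket_count" 0 (· + 1) else summary
  let summary := if PySem.Str.isIn "COMMENT" message then summary.modify "comment_count" 0 (· + 1) else summary
  let summary := if PySem.Str.isIn "SECURITY" message || PySem.Str.isIn "UNAUTHORIZED" message then summary.modify "security_count" 0 (· + 1) else summary
  summary

def get_summary_statistics (logs : List (List (String × String))) : List (String × Int) :=
  let summary : PySem.Dict String Int := PySem.Dict.ofList
    [("total_logs", (logs.length : Int)), ("error_count", 0), ("warning_count", 0),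
     ("info_count", 0), ("login_count", 0), ("logout_count", 0), ("ticket_count", 0),
     ("comment_count", 0), ("security_count", 0)]
  (logs.foldl gssStep summary).items

-- ===== PORT B =====
-- helpers message(log) / level(log) of Source B
def gssMessage (log : List (String × String)) : String := PySem.Str.upper (pyLogGet log "message" "")
def gssLevel (log : List (String × String)) : String := pyLogGet log "level" "INFO"

def get_summary_statistics_alt (logs : List (List (String × String))) : List (String × Int) :=
  [("total_logs", (logs.length : Int)),
   ("error_count", (logs.countP (fun log => gssLevel log == "ERROR") : Int)),
   ("warning_count", (logs.countP (fun log => gssLevel log == "WARNING") : Int)),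
   ("info_count", (logs.countP (fun log => !(gssLevel log == "ERROR") && !(gssLevel log == "WARNING")) : Int)),
   ("login_count", (logs.countP (fun log => PySem.Str.isIn "LOGIN" (gssMessage log)) : Int)),
   ("logout_count", (logs.countP (fun log => PySem.Str.isIn "LOGOUT" (gssMessage log)) : Int)),
   ("ticket_count", (logs.countP (fun log => PySem.Str.isIn "TICKET" (gssMessage log)) : Int)),
   ("comment_count", (logs.countP (fun log => PySem.Str.isIn "COMMENT" (gssMessage log)) : Int)),
   ("security_count", (logs.countP (fun log => PySem.Str.isIn "SECURITY" (gssMessage log) || PySem.Str.isIn "UNAUTHORIZED" (gssMessage log)) : Int))]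

-- ===== PRECONDITION & SPEC =====
def Spec_get_summary_statistics (logs : List (List (String × String))) (out : List (String × Int)) : Prop := out = get_summary_statistics_alt logs
instance (logs : List (List (String × String))) (out : List (String × Int)) : Decidable (Spec_get_summary_statistics logs out) := by unfold Spec_get_summary_statistics; infer_instance

-- ===== CLAIM (what is proved, stated in full; the proofs are below) =====
def Claim_equal_get_summary_statistics : Prop := ∀ (logs : List (List (String × String))), Dom_get_summary_statistics logs → Spec_get_summary_statistics logs (get_summary_statistics logs)

-- ===== LEMMAS AND PROOFS =====

-- the literal summary dict, abbreviated for the proofs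
def gssD (t e w i a b c d s : Int) : PySem.Dict String Int :=
  PySem.Dict.mk
    [("total_logs", t), ("error_count", e), ("warning_count", w), ("info_count", i),
     ("login_count", a), ("logout_count", b), ("ticket_count", c), ("comment_count", d),
     ("security_count", s)]

lemma gssD_mE (t e w i a b c d s : Int) : (gssD t e w i a b c d s).modify "error_count" 0 (· + 1) = gssD t (e+1) w i a b c d s := rfl
lemma gssD_mW (t e w i a b c d s : Int) : (gssD t e w i a b c d s).modify "warning_count" 0 (· + 1) = gssD t e (w+1) i a b c d s := rfl
lemma gssD_mI (t e w i a b c d s : Int) : (gssD t e w i a b c d s).modify "info_count" 0 (· + 1) = gssD t e w (i+1) a b c d s := rfl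
lemma gssD_mA (t e w i a b c d s : Int) : (gssD t e w i a b c d s).modify "login_count" 0 (· + 1) = gssD t e w i (a+1) b c d s := rfl
lemma gssD_mB (t e w i a b c d s : Int) : (gssD t e w i a b c d s).modify "logout_count" 0 (· + 1) = gssD t e w i a (b+1) c d s := rfl
lemma gssD_mC (t e w i a b c d s : Int) : (gssD t e w i a b c d s).modify "ticket_count" 0 (· + 1) = gssD t e w i a b (c+1) d s := rfl
lemma gssD_mD (t e w i a b c d s : Int) : (gssD t e w i a b c d s).modify "comment_count" 0 (· + 1) = gssD t e w i a b c (d+1) s := rfl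
lemma gssD_mS (t e w i a b c d s : Int) : (gssD t e w i a b c d s).modify "security_count" 0 (· + 1) = gssD t e w i a b c d (s+1) := rfl

set_option maxHeartbeats 2000000 in
lemma gssStep_mk (t e w i a b c d s : Int) (log : List (String × String)) :
    gssStep (gssD t e w i a b c d s) log
    = gssD t
       (e + if gssLevel log == "ERROR" then 1 else 0)
       (w + if gssLevel log == "WARNING" then 1 else 0)
       (i + if !(gssLevel log == "ERROR") && !(gssLevel log == "WARNING") then 1 else 0)
       (a + if PySem.Str.isIn "LOGIN" (gssMessage log) then 1 else 0)
       (b + if PySem.Str.isIn "LOGOUT" (gssMessage log) then 1 else 0)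
       (c + if PySem.Str.isIn "TICKET" (gssMessage log) then 1 else 0)
       (d + if PySem.Str.isIn "COMMENT" (gssMessage log) then 1 else 0)
       (s + if PySem.Str.isIn "SECURITY" (gssMessage log) || PySem.Str.isIn "UNAUTHORIZED" (gssMessage log) then 1 else 0) := by
  by_cases h1 : (pyLogGet log "level" "INFO") == "ERROR" <;>
  by_cases h2 : (pyLogGet log "level" "INFO") == "WARNING" <;>
  by_cases h4 : PySem.Str.isIn "LOGIN" (PySem.Str.upper (pyLogGet log "message" "")) <;>
  by_cases h5 : PySem.Str.isIn "LOGOUT" (PySem.Str.upper (pyLogGet log "message" "")) <;>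
  by_cases h6 : PySem.Str.isIn "TICKET" (PySem.Str.upper (pyLogGet log "message" "")) <;>
  by_cases h7 : PySem.Str.isIn "COMMENT" (PySem.Str.upper (pyLogGet log "message" "")) <;>
  by_cases h8 : (PySem.Str.isIn "SECURITY" (PySem.Str.upper (pyLogGet log "message" "")) || PySem.Str.isIn "UNAUTHORIZED" (PySem.Str.upper (pyLogGet log "message" ""))) <;>
  simp only [gssStep, gssLevel, gssMessage, h1, h2, h4, h5, h6, h7, h8, if_true, if_false,
    Bool.not_true, Bool.not_false, Bool.and_true, Bool.and_false,
    gssD_mE, gssD_mW, gssD_mI, gssD_mA, gssD_mB, gssD_mC, gssD_mD, gssD_mS,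
    Bool.false_eq_true, Bool.true_eq_false, ite_true, ite_false, add_zero] <;> simp_all

lemma gss_fold_items (logs : List (List (String × String))) :
    ∀ t e w i a b c d s : Int,
    (logs.foldl gssStep (gssD t e w i a b c d s)).items
    = [("total_logs", t),
       ("error_count", e + (logs.countP (fun log => gssLevel log == "ERROR") : Int)),
       ("warning_count", w + (logs.countP (fun log => gssLevel log == "WARNING") : Int)),
       ("info_count", i + (logs.countP (fun log => !(gssLevel log == "ERROR") && !(gssLevel log == "WARNING")) : Int)),
       ("login_count", a + (logs.countP (fun log => PySem.Str.isIn "LOGIN" (gssMessage log)) : Int)),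
       ("logout_count", b + (logs.countP (fun log => PySem.Str.isIn "LOGOUT" (gssMessage log)) : Int)),
       ("ticket_count", c + (logs.countP (fun log => PySem.Str.isIn "TICKET" (gssMessage log)) : Int)),
       ("comment_count", d + (logs.countP (fun log => PySem.Str.isIn "COMMENT" (gssMessage log)) : Int)),
       ("security_count", s + (logs.countP (fun log => PySem.Str.isIn "SECURITY" (gssMessage log) || PySem.Str.isIn "UNAUTHORIZED" (gssMessage log)) : Int))] := by
  induction logs with
  | nil => intro t e w i a b c d s; simp [gssD]
  | cons x rest ih =>
    intro t e w i a b c d s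
    rw [List.foldl_cons, gssStep_mk, ih]
    simp only [List.countP_cons, List.cons.injEq, Prod.mk.injEq, true_and, and_true]
    push_cast
    and_intros <;> ring

-- ===== VERDICT (by name: the statement is the Claim_ definition above) =====
theorem get_summary_statistics_spec : Claim_equal_get_summary_statistics := by
  intro logs _
  unfold Spec_get_summary_statistics get_summary_statistics get_summary_statistics_alt
  have h0 : (PySem.Dict.ofList
      [("total_logs", (logs.length : Int)), ("error_count", 0), ("warning_count", 0),
       ("info_count", 0), ("login_count", 0), ("logout_count", 0), ("ticket_count", 0),
       ("comment_count", 0), ("security_count", 0)] : PySem.Dict String Int)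
      = gssD (logs.length : Int) 0 0 0 0 0 0 0 0 := by rfl
  simp only [h0, gss_fold_items, zero_add]
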